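-- pv_equiv track=rewrite | github.com/s2173175/kernel_learning | agent/gym_A1/envs/a1_env_final.py | _parse_keyboard_input
-- ===== SOURCE A (Python) =====
-- import collections
--
-- def _parse_keyboard_input(pressed_keys):
--     # parse keys into linear, angular velocity commands
--     key_map = collections.defaultdict(lambda: 0b0000)
--     key_map[65295] = 0b000001  # 'left',
--     key_map[65296] = 0b000010  # 'right',
--     key_map[65297] = 0b000100  # 'up',
--     key_map[65298] = 0b001000  # 'down'
--     key_map[44] = 0b010000  # 'turn-left'
--     key_map[46] = 0b100000  # 'turn-right'
--
--     key_comp = sum([key_map[k] for k in pressed_keys])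
--
--     directions = collections.defaultdict(lambda: None)
--     directions[0b000001] = 'l'  # left
--     directions[0b000010] = 'r'  # right
--     directions[0b000100] = 'f'  # front
--     directions[0b001000] = 'b'  # back
--     directions[0b000101] = 'fl'  # front-left
--     directions[0b000110] = 'fr'  # front-right
--     directions[0b001001] = 'bl'  # back-left
--     directions[0b001010] = 'br'  # back-right
--
--     directions[0b010000] = 'tl'  # turn-left
--     directions[0b100000] = 'tr'  # turn-right
--
--     #      linear velocity command          angular velocity command
--     return directions[key_comp & 0b001111], directions[key_comp & 0b110000]
-- ===== SOURCE B (Python) =====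
-- import collections
--
-- def _parse_keyboard_input(pressed_keys):
--     # parse keys into linear, angular velocity commands
--     key_map = collections.defaultdict(lambda: 0b0000)
--     key_map[65295] = 0b000001  # 'left'
--     key_map[65296] = 0b000010  # 'right'
--     key_map[65297] = 0b000100  # 'up'
--     key_map[65298] = 0b001000  # 'down'
--     key_map[44] = 0b010000     # 'turn-left'
--     key_map[46] = 0b100000     # 'turn-right'
--
--     key_comp = sum([key_map[k] for k in pressed_keys])
--
--     # decode the linear command directly from the four direction bits
--     lo = key_comp & 0b001111
--     left, right = bool(lo & 0b0001), bool(lo & 0b0010)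
--     front, back = bool(lo & 0b0100), bool(lo & 0b1000)
--     if (left and right) or (front and back):
--         linear = None
--     else:
--         word = ('f' if front else 'b' if back else '') + \
--                ('l' if left else 'r' if right else '')
--         linear = word if word else None
--
--     # decode the angular command from the two turn bits
--     hi = key_comp & 0b110000
--     angular = 'tl' if hi == 0b010000 else ('tr' if hi == 0b100000 else None)
--
--     return linear, angular
-- ===== Notes on version B (the rewrite author's own statement) =====
-- stated objective: simpler
-- what changed: keeps the same sum-of-bitmasks key_comp but replaces the sparse 10-entry combinations dictionary with a direct bitwise decode: vertical part (f/b bits), horizontal part (l/r bits), conflicts and empty give None, plus a two-way check on the turn bits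
import Mathlib
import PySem

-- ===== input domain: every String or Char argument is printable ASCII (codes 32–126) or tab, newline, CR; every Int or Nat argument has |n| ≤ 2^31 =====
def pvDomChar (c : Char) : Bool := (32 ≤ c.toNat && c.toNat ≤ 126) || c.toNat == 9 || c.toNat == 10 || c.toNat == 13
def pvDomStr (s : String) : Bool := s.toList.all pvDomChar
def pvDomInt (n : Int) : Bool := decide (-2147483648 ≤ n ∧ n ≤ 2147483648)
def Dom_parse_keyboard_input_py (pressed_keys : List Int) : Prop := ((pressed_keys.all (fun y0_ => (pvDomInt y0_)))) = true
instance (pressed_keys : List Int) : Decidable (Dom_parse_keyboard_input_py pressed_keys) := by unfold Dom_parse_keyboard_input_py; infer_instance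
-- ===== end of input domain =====

-- B replaces A's sparse 10-entry combinations dictionary by a direct bitwise decode of the
-- same bitmask sum (vertical part + horizontal part + turn bits); objective: simpler decomposition.

-- ===== PORT A =====
-- key_map: defaultdict with default 0; its values are nonnegative bitmasks, ported as Nat
def pvKeyMapA (k : Int) : Nat :=
  if k = 65295 then 1 else if k = 65296 then 2 else if k = 65297 then 4
  else if k = 65298 then 8 else if k = 44 then 16 else if k = 46 then 32 else 0

-- directions: defaultdict with default None; lookup of a literal-keyed dict, exact
def pvDirectionsA (n : Nat) : Option String :=
  if n = 1 then some "l" else if n = 2 then some "r" else if n = 4 then some "f"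
  else if n = 8 then some "b" else if n = 5 then some "fl" else if n = 6 then some "fr"
  else if n = 9 then some "bl" else if n = 10 then some "br"
  else if n = 16 then some "tl" else if n = 32 then some "tr" else none

def parse_keyboard_input_py (pressed_keys : List Int) : Option String × Option String :=
  let key_comp := (pressed_keys.map pvKeyMapA).sum
  (pvDirectionsA (key_comp &&& 15), pvDirectionsA (key_comp &&& 48))

-- ===== PORT B =====
-- B builds the same key_map table; pvKeyMapA is shared as the common bitmask table
def parse_keyboard_input_py_alt (pressed_keys : List Int) : Option String × Option String :=
  let key_comp := (pressed_keys.map pvKeyMapA).sum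
  let lo := key_comp &&& 15
  let left := lo &&& 1 ≠ 0
  let right := lo &&& 2 ≠ 0
  let front := lo &&& 4 ≠ 0
  let back := lo &&& 8 ≠ 0
  let linear : Option String :=
    if (left ∧ right) ∨ (front ∧ back) then none
    else
      let word := (if front then "f" else if back then "b" else "") ++
                  (if left then "l" else if right then "r" else "")
      if word = "" then none else some word
  let hi := key_comp &&& 48
  let angular : Option String := if hi = 16 then some "tl" else if hi = 32 then some "tr" else none
  (linear, angular)

-- ===== PRECONDITION & SPEC =====
def Spec_parse_keyboard_input_py (pressed_keys : List Int) (out : Option String × Option String) : Prop := out = parse_keyboard_input_py_alt pressed_keys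
instance (pressed_keys : List Int) (out : Option String × Option String) : Decidable (Spec_parse_keyboard_input_py pressed_keys out) := by unfold Spec_parse_keyboard_input_py; infer_instance

-- ===== CLAIM (what is proved, stated in full; the proofs are below) =====
def Claim_equal_parse_keyboard_input_py : Prop := ∀ (pressed_keys : List Int), Dom_parse_keyboard_input_py pressed_keys → Spec_parse_keyboard_input_py pressed_keys (parse_keyboard_input_py pressed_keys)

-- ===== LEMMAS AND PROOFS =====
-- both decoders depend only on the low 6 bits of key_comp
theorem pv_and_15 (n : Nat) : n &&& 15 = (n &&& 63) &&& 15 := by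
  have h : (63 &&& 15 : Nat) = 15 := by decide
  rw [Nat.and_assoc, h]

theorem pv_and_48 (n : Nat) : n &&& 48 = (n &&& 63) &&& 48 := by
  have h : (63 &&& 48 : Nat) = 48 := by decide
  rw [Nat.and_assoc, h]

-- the two decoders agree on every residue of the low 6 bits
theorem pv_decode_eq : ∀ m < 64,
    (pvDirectionsA (m &&& 15), pvDirectionsA (m &&& 48)) =
    (let lo := m &&& 15
     let left := lo &&& 1 ≠ 0
     let right := lo &&& 2 ≠ 0
     let front := lo &&& 4 ≠ 0
     let back := lo &&& 8 ≠ 0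
     let linear : Option String :=
       if (left ∧ right) ∨ (front ∧ back) then none
       else
         let word := (if front then "f" else if back then "b" else "") ++
                     (if left then "l" else if right then "r" else "")
         if word = "" then none else some word
     let hi := m &&& 48
     let angular : Option String := if hi = 16 then some "tl" else if hi = 32 then some "tr" else none
     (linear, angular)) := by
  decide

-- ===== VERDICT (by name: the statement is the Claim_ definition above) =====
theorem parse_keyboard_input_py_spec : Claim_equal_parse_keyboard_input_py := by
  intro pressed_keys _
  unfold Spec_parse_keyboard_input_py parse_keyboard_input_py parse_keyboard_input_py_alt
  set n := (pressed_keys.map pvKeyMapA).sum with hn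
  have h64 : n &&& 63 < 64 := Nat.lt_succ_of_le (Nat.le_of_lt_succ (Nat.lt_succ_of_le (Nat.and_le_right)))
  have := pv_decode_eq (n &&& 63) (by omega)
  simp only at this ⊢
  rw [pv_and_15 n, pv_and_48 n]
  exact this.symm ▸ rfl
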